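-- pv_equiv track=rewrite | github.com/JakeMate15/competitive-programming | codeForces/G_Natlan_Exploring.py | compute_mobius
-- ===== SOURCE A (Python) =====
-- def compute_mobius(max_n):
--     mobius = [1] * (max_n + 1)
--     spf = [0] * (max_n + 1)  # Smallest prime factor
--     for i in range(2, max_n + 1):
--         if spf[i] == 0:
--             spf[i] = i
--             for j in range(2 * i, max_n + 1, i):
--                 if spf[j] == 0:
--                     spf[j] = i
--         if spf[i] == i:
--             for j in range(i, max_n + 1, i):
--                 mobius[j] *= -1
--             square = i * i
--             for j in range(square, max_n + 1, square):
--                 mobius[j] = 0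
--     return mobius, spf
-- ===== SOURCE B (Python) =====
-- def compute_mobius(max_n):
--     mobius = [1] * (max_n + 1)
--     spf = [0] * (max_n + 1)
--     primes = []
--     for i in range(2, max_n + 1):
--         if spf[i] == 0:
--             spf[i] = i
--             mobius[i] = -1
--             primes.append(i)
--         for p in primes:
--             if i * p > max_n:
--                 break
--             spf[i * p] = p
--             if i % p == 0:
--                 mobius[i * p] = 0
--                 break
--             mobius[i * p] = -mobius[i]
--     return mobius, spf
-- ===== Notes on version B (the rewrite author's own statement) =====
-- stated objective: alternative
-- what changed: Replaces the Eratosthenes-style sieve (for each prime: mark spf on all multiples, flip mobius signs on all multiples, zero mobius on square multiples - three passes) by a linear/Euler sieve that maintains a growing list of primes and assigns spf and mobius of each composite i*p exactly once, breaking at the first prime dividing i; intended as faster (measured 1.3-1.6x, below the 1.5x confirmation bar at the largest size).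
import Mathlib
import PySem

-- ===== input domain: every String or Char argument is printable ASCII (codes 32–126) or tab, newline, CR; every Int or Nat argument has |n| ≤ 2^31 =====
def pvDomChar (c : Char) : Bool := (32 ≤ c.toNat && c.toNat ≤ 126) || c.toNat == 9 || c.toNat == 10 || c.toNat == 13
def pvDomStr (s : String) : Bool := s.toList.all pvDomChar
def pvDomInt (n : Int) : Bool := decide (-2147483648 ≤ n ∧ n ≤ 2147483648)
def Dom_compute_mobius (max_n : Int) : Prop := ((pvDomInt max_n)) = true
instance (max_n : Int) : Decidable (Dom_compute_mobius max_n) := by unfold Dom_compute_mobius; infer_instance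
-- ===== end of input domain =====

-- B replaces A's Eratosthenes-style sieve (three marking passes per prime) by a linear (Euler)
-- sieve that keeps a list of primes and assigns spf/mobius of each composite exactly once
-- (a different algorithm of comparable measured cost).
-- ===== PORT A =====
def compute_mobius (max_n : Int) : List Int × List Int :=
  (PySem.List.pyRange 2 (max_n + 1) 1).foldl (fun st i =>
    let mobius := st.1
    let spf := st.2
    let spf :=
      if PySem.List.pyGetD spf i 0 = 0 then
        (PySem.List.pyRange (2 * i) (max_n + 1) i).foldl
          (fun spf j => if PySem.List.pyGetD spf j 0 = 0 then PySem.List.pySetD spf j i else spf)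
          (PySem.List.pySetD spf i i)
      else spf
    let mobius :=
      if PySem.List.pyGetD spf i 0 = i then
        (PySem.List.pyRange (i * i) (max_n + 1) (i * i)).foldl
          (fun mobius j => PySem.List.pySetD mobius j 0)
          ((PySem.List.pyRange i (max_n + 1) i).foldl
            (fun mobius j => PySem.List.pySetD mobius j (PySem.List.pyGetD mobius j 0 * (-1))) mobius)
      else mobius
    (mobius, spf))
    (List.replicate (max_n + 1).toNat 1, List.replicate (max_n + 1).toNat 0)

-- ===== PORT B =====
-- B's inner `for p in primes: ... break` loop, as structural recursion on the primes list
def pvMarkLoop (max_n i : Int) : List Int → List Int × List Int → List Int × List Int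
  | [], st => st
  | p :: ps, st =>
    if max_n < i * p then st
    else
      let spf := PySem.List.pySetD st.2 (i * p) p
      if PySem.Int.mod i p = 0 then (PySem.List.pySetD st.1 (i * p) 0, spf)
      else pvMarkLoop max_n i ps
        (PySem.List.pySetD st.1 (i * p) (-(PySem.List.pyGetD st.1 i 0)), spf)

def compute_mobius_alt (max_n : Int) : List Int × List Int :=
  let st := (PySem.List.pyRange 2 (max_n + 1) 1).foldl (fun st i =>
    let st :=
      if PySem.List.pyGetD st.2.1 i 0 = 0 then
        (PySem.List.pySetD st.1 i (-1), PySem.List.pySetD st.2.1 i i, st.2.2 ++ [i])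
      else st
    let ms := pvMarkLoop max_n i st.2.2 (st.1, st.2.1)
    (ms.1, ms.2, st.2.2))
    (List.replicate (max_n + 1).toNat 1, List.replicate (max_n + 1).toNat 0, ([] : List Int))
  (st.1, st.2.1)

-- ===== PRECONDITION & SPEC =====
def Spec_compute_mobius (max_n : Int) (out : List Int × List Int) : Prop := out = compute_mobius_alt max_n
instance (max_n : Int) (out : List Int × List Int) : Decidable (Spec_compute_mobius max_n out) := by unfold Spec_compute_mobius; infer_instance

-- ===== CLAIM (what is proved, stated in full; the proofs are below) =====
def Claim_equal_compute_mobius : Prop := ∀ (max_n : Int), Dom_compute_mobius max_n → Spec_compute_mobius max_n (compute_mobius max_n)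

-- ===== LEMMAS AND PROOFS =====

-- final values: pvMuF t = Möbius μ(t) for t ≥ 2 (indices 0,1 stay 1, as in both programs),
-- pvSpfF t = smallest prime factor for t ≥ 2, else 0
def pvMuF (t : Nat) : Int := if t < 2 then 1 else if Squarefree t then (-1) ^ t.primeFactors.card else 0
def pvSpfF (t : Nat) : Int := if t < 2 then 0 else (t.minFac : Int)

-- A's loop invariant after the outer loop has processed i = 2 .. k-1
def pvGF (k t : Nat) : Int :=
  if t < 2 then 1
  else if ∃ p ∈ Finset.range k, p.Prime ∧ p * p ∣ t then 0
  else (-1) ^ ((Finset.range k).filter (fun p => p.Prime ∧ p ∣ t)).card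
def pvHF (k t : Nat) : Int := if 2 ≤ t ∧ t.minFac < k then (t.minFac : Int) else 0

-- B's loop invariant: pvAsg t is the outer index at which the linear sieve assigns index t
def pvAsg (t : Nat) : Nat := if t.Prime then t else t / t.minFac
def pvGB (k t : Nat) : Int := if 2 ≤ t ∧ pvAsg t < k then pvMuF t else 1
def pvHB (k t : Nat) : Int := if 2 ≤ t ∧ pvAsg t < k then (t.minFac : Int) else 0
def pvPrimes (k : Nat) : List Nat := (List.range k).filter (fun p => decide p.Prime)

-- the two loop bodies, names for the lambdas inside the ports (definitionally equal to them)
def pvBodyA (N : Int) : List Int × List Int → Int → List Int × List Int := fun st i =>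
  let mobius := st.1
  let spf := st.2
  let spf :=
    if PySem.List.pyGetD spf i 0 = 0 then
      (PySem.List.pyRange (2 * i) N i).foldl
        (fun spf j => if PySem.List.pyGetD spf j 0 = 0 then PySem.List.pySetD spf j i else spf)
        (PySem.List.pySetD spf i i)
    else spf
  let mobius :=
    if PySem.List.pyGetD spf i 0 = i then
      (PySem.List.pyRange (i * i) N (i * i)).foldl
        (fun mobius j => PySem.List.pySetD mobius j 0)
        ((PySem.List.pyRange i N i).foldl
          (fun mobius j => PySem.List.pySetD mobius j (PySem.List.pyGetD mobius j 0 * (-1))) mobius)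
    else mobius
  (mobius, spf)

def pvBodyB (mx : Int) : List Int × List Int × List Int → Int → List Int × List Int × List Int := fun st i =>
  let st :=
    if PySem.List.pyGetD st.2.1 i 0 = 0 then
      (PySem.List.pySetD st.1 i (-1), PySem.List.pySetD st.2.1 i i, st.2.2 ++ [i])
    else st
  let ms := pvMarkLoop mx i st.2.2 (st.1, st.2.1)
  (ms.1, ms.2, st.2.2)

theorem pvA_as_body (max_n : Int) :
    compute_mobius max_n =
      (PySem.List.pyRange 2 (max_n + 1) 1).foldl (pvBodyA (max_n + 1))
        (List.replicate (max_n + 1).toNat 1, List.replicate (max_n + 1).toNat 0) := rfl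

theorem pvB_as_body (max_n : Int) :
    compute_mobius_alt max_n =
      (let st := (PySem.List.pyRange 2 (max_n + 1) 1).foldl (pvBodyB max_n)
        (List.replicate (max_n + 1).toNat 1, List.replicate (max_n + 1).toNat 0, ([] : List Int))
       (st.1, st.2.1)) := rfl

-- ---- generic list/array tools ----

theorem pv_map_range_congr (n : Nat) (g g' : Nat → Int) (h : ∀ t, t < n → g t = g' t) :
    (List.range n).map g = (List.range n).map g' := by
  apply List.map_congr_left
  intro t ht
  exact h t (List.mem_range.mp ht)

theorem pv_set_map_range (n k : Nat) (g : Nat → Int) (v : Int) (_hk : k < n) :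
    ((List.range n).map g).set k v = (List.range n).map (Function.update g k v) := by
  apply List.ext_getElem (by simp)
  intro t ht1 ht2
  simp only [List.getElem_set, List.getElem_map, List.getElem_range] at *
  by_cases h : t = k <;> simp [h, Function.update]
  intro h'; exact absurd h'.symm h

theorem pv_pyGetD_map_range (n t : Nat) (g : Nat → Int) (d : Int) (ht : t < n) :
    PySem.List.pyGetD ((List.range n).map g) (t : Int) d = g t := by
  rw [PySem.List.pyGetD_natCast]
  exact PySem.List.getD_map_range g n t d ht

theorem pv_pySetD_map_range (n k : Nat) (g : Nat → Int) (v : Int) (hk : k < n) :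
    PySem.List.pySetD ((List.range n).map g) (k : Int) v = (List.range n).map (Function.update g k v) := by
  rw [PySem.List.pySetD_natCast]
  exact pv_set_map_range n k g v hk

theorem pv_foldl_setU (u : Int → Int) (js : List Int) (n : Nat) (g : Nat → Int)
    (hnd : js.Nodup) (hb : ∀ j ∈ js, 0 ≤ j ∧ j < (n : Int)) :
    js.foldl (fun xs j => PySem.List.pySetD xs j (u (PySem.List.pyGetD xs j 0))) ((List.range n).map g)
      = (List.range n).map fun (t : Nat) => if (t : Int) ∈ js then u (g t) else g t := by
  induction js generalizing g with
  | nil => simp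
  | cons j js ih =>
    obtain ⟨hj0, hjn⟩ := hb j (by simp)
    have hjt : j.toNat < n := by omega
    have hjj : ((j.toNat : Nat) : Int) = j := Int.toNat_of_nonneg hj0
    rw [List.foldl_cons]
    have hjnotin : j ∉ js := (List.nodup_cons.mp hnd).1
    have hget : PySem.List.pyGetD ((List.range n).map g) j 0 = g j.toNat := by
      rw [← hjj, pv_pyGetD_map_range n j.toNat g 0 hjt]
      congr 1
    rw [hget, PySem.List.pySetD_of_nonneg _ _ hj0, pv_set_map_range n _ _ _ hjt,
      ih (Function.update g j.toNat (u (g j.toNat))) hnd.of_cons (fun x hx => hb x (by simp [hx]))]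
    apply pv_map_range_congr
    intro t ht
    by_cases hmem : (t : Int) ∈ js
    · have htj : t ≠ j.toNat := by
        intro he
        exact (List.nodup_cons.mp hnd).1 (by rw [← hjj, ← he]; exact hmem)
      simp [hmem, Function.update, htj, List.mem_cons]
    · by_cases hej : (t : Int) = j
      · have : t = j.toNat := by omega
        simp [this, hjj, Function.update, hmem, hjnotin]
      · have : t ≠ j.toNat := by intro he; exact hej (by rw [he, hjj])
        simp [hmem, hej, Function.update, this]

theorem pv_nodup_pyRange_pos (a b s : Int) (hs : 0 < s) : (PySem.List.pyRange a b s).Nodup := by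
  rw [PySem.List.pyRange_of_pos a b hs]
  refine List.Nodup.map ?_ List.nodup_range
  intro k1 k2 he
  have h1 : (s : Int) * k1 = s * k2 := by
    have := add_left_cancel he
    exact this
  have := mul_left_cancel₀ (show (s : Int) ≠ 0 by omega) h1
  exact_mod_cast this

theorem pv_condset_eq (xs : List Int) (j v : Int) (hj : 0 ≤ j) :
    (if PySem.List.pyGetD xs j 0 = 0 then PySem.List.pySetD xs j v else xs)
      = PySem.List.pySetD xs j (if PySem.List.pyGetD xs j 0 = 0 then v else PySem.List.pyGetD xs j 0) := by
  split_ifs with hc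
  · rfl
  · by_cases hlt : j < (xs.length : Int)
    · rw [PySem.List.pyGetD_eq_getElem xs 0 hj hlt, PySem.List.pySetD_of_nonneg xs _ hj,
        List.set_getElem_self]
    · rw [PySem.List.pySetD_of_nonneg xs _ hj, List.set_eq_of_length_le (by omega)]

-- membership in an arithmetic-progression range whose start is c*s
theorem pv_mem_prog (s c t n : Nat) (hs : 0 < s) :
    ((t : Int) ∈ PySem.List.pyRange ((c * s : Nat) : Int) ((n : Nat) : Int) (s : Int))
      ↔ (c * s ≤ t ∧ t < n ∧ s ∣ t) := by
  rw [PySem.List.mem_pyRange_iff_of_pos (by exact_mod_cast hs)]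
  constructor
  · rintro ⟨h1, h2, hd⟩
    refine ⟨by exact_mod_cast h1, by exact_mod_cast h2, ?_⟩
    have hdt : (s : Int) ∣ (t : Int) := by
      have h3 : (s : Int) ∣ ((t : Int) - ((c * s : Nat) : Int)) + ((c * s : Nat) : Int) :=
        dvd_add hd ⟨c, by push_cast; ring⟩
      simpa using h3
    exact_mod_cast hdt
  · rintro ⟨h1, h2, hd⟩
    refine ⟨by exact_mod_cast h1, by exact_mod_cast h2, ?_⟩
    have hdt : (s : Int) ∣ (t : Int) := by exact_mod_cast hd
    exact dvd_sub hdt ⟨c, by push_cast; ring⟩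

theorem pv_mem_prog' (a s' : Int) (s c t n : Nat) (hs : 0 < s)
    (ha : a = ((c * s : Nat) : Int)) (hs' : s' = ((s : Nat) : Int)) :
    ((t : Int) ∈ PySem.List.pyRange a ((n : Nat) : Int) s') ↔ (c * s ≤ t ∧ t < n ∧ s ∣ t) := by
  subst ha; subst hs'
  exact pv_mem_prog s c t n hs

-- ---- number-theory facts ----

theorem pv_prime_iff_minFac (i : Nat) (h2 : 2 ≤ i) : i.Prime ↔ i.minFac = i := by
  rw [Nat.prime_def_minFac]
  exact ⟨fun h => h.2, fun h => ⟨h2, h⟩⟩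

theorem pv_minFac_mul (i p : Nat) (h2 : 2 ≤ i) (hp : p.Prime) (hle : p ≤ i.minFac) :
    (i * p).minFac = p := by
  have hne : i * p ≠ 1 := by
    have := hp.two_le; intro h; nlinarith
  have hq := Nat.minFac_prime hne
  have hd := Nat.minFac_dvd (i * p)
  have hup : (i * p).minFac ≤ p :=
    Nat.minFac_le_of_dvd hp.two_le ⟨i, by ring⟩
  rcases (Nat.Prime.dvd_mul hq).mp hd with h | h
  · have := Nat.minFac_le_of_dvd hq.two_le h
    omega
  · have := (Nat.prime_dvd_prime_iff_eq hq hp).mp h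
    omega

theorem pv_muF_prime (p : Nat) (hp : p.Prime) : pvMuF p = -1 := by
  have h2 := hp.two_le
  simp only [pvMuF, if_neg (by omega : ¬ p < 2), hp.squarefree, if_pos, hp.primeFactors]
  simp

theorem pv_muF_mul_dvd (i p : Nat) (h2 : 2 ≤ i) (hp : p.Prime) (hd : p ∣ i) : pvMuF (i * p) = 0 := by
  have hp2 := hp.two_le
  have hlt : ¬ i * p < 2 := by nlinarith
  have hsq : ¬ Squarefree (i * p) := by
    intro hsq
    obtain ⟨k, hk⟩ := hd
    exact (Nat.squarefree_iff_prime_squarefree.mp hsq) p hp ⟨k, by rw [hk]; ring⟩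
  simp [pvMuF, hlt, hsq]

theorem pv_muF_mul (i p : Nat) (h2 : 2 ≤ i) (hp : p.Prime) (hlt : p < i.minFac) :
    pvMuF (i * p) = -(pvMuF i) := by
  have hp2 := hp.two_le
  have hnd : ¬ p ∣ i := fun hd => by
    have := Nat.minFac_le_of_dvd hp.two_le hd; omega
  have hcop : Nat.Coprime p i := (Nat.Prime.coprime_iff_not_dvd hp).mpr hnd
  have hi0 : i ≠ 0 := by omega
  have hp0 : p ≠ 0 := by omega
  have hmul2 : ¬ i * p < 2 := by nlinarith
  have hpf : (i * p).primeFactors = insert p i.primeFactors := by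
    rw [Nat.primeFactors_mul hi0 hp0, hp.primeFactors]
    ext q; simp [or_comm]
  have hpnotin : p ∉ i.primeFactors := by
    simp [Nat.mem_primeFactors, hnd]
  by_cases hsq : Squarefree i
  · have hsqm : Squarefree (i * p) := by
      rw [mul_comm, Nat.squarefree_mul hcop]
      exact ⟨hp.squarefree, hsq⟩
    simp only [pvMuF, if_neg hmul2, if_neg (by omega : ¬ i < 2), if_pos hsqm, if_pos hsq,
      hpf, Finset.card_insert_of_notMem hpnotin]
    ring
  · have hsqm : ¬ Squarefree (i * p) := fun hs => hsq (hs.squarefree_of_dvd ⟨p, rfl⟩)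
    simp only [pvMuF, if_neg hmul2, if_neg (by omega : ¬ i < 2), if_neg hsqm, if_neg hsq]
    ring

theorem pv_mem_pvPrimes (k q : Nat) : q ∈ pvPrimes k ↔ q < k ∧ q.Prime := by
  simp [pvPrimes, List.mem_filter, List.mem_range]

theorem pv_pvPrimes_sorted (k : Nat) : (pvPrimes k).Pairwise (· < ·) := by
  exact List.Pairwise.filter _ (List.pairwise_lt_range)

theorem pv_pvPrimes_succ_prime (i : Nat) (hi : i.Prime) : pvPrimes (i + 1) = pvPrimes i ++ [i] := by
  simp [pvPrimes, List.range_succ, List.filter_append, hi]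

theorem pv_pvPrimes_succ_comp (i : Nat) (hi : ¬ i.Prime) : pvPrimes (i + 1) = pvPrimes i := by
  simp [pvPrimes, List.range_succ, List.filter_append, hi]

-- ---- A-side proof ----

theorem pvHF_eq_zero_iff (k t : Nat) : pvHF k t = 0 ↔ ¬ (2 ≤ t ∧ t.minFac < k) := by
  unfold pvHF
  split_ifs with h
  · have h2 := (Nat.minFac_prime (by omega : t ≠ 1)).two_le
    constructor
    · intro he
      exfalso
      have : t.minFac = 0 := by exact_mod_cast he
      omega
    · intro hn; exact absurd h hn
  · simp [h]

theorem pvHF_step_comp (i t : Nat) (h2 : 2 ≤ i) (hnp : ¬ i.Prime) : pvHF (i + 1) t = pvHF i t := by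
  unfold pvHF
  by_cases h2t : 2 ≤ t
  · have hne : t.minFac ≠ i := fun he => hnp (he ▸ Nat.minFac_prime (by omega : t ≠ 1))
    by_cases hlt : t.minFac < i
    · simp [h2t, hlt, (by omega : t.minFac < i + 1)]
    · have hnle : ¬ t.minFac ≤ i := by omega
      simp [h2t, hlt, Nat.lt_succ_iff, hnle]
  · simp [h2t]

theorem pvGF_step_comp (i t : Nat) (hnp : ¬ i.Prime) : pvGF (i + 1) t = pvGF i t := by
  unfold pvGF
  have hex : (∃ p ∈ Finset.range (i + 1), p.Prime ∧ p * p ∣ t)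
      ↔ (∃ p ∈ Finset.range i, p.Prime ∧ p * p ∣ t) := by
    constructor
    · rintro ⟨p, hp, hpp, hd⟩
      have hpi : p ≠ i := fun h => hnp (h ▸ hpp)
      have := Finset.mem_range.mp hp
      exact ⟨p, Finset.mem_range.mpr (by omega), hpp, hd⟩
    · rintro ⟨p, hp, hpp, hd⟩
      have := Finset.mem_range.mp hp
      exact ⟨p, Finset.mem_range.mpr (by omega), hpp, hd⟩
  have hfl : (Finset.range (i + 1)).filter (fun p => p.Prime ∧ p ∣ t)
      = (Finset.range i).filter (fun p => p.Prime ∧ p ∣ t) := by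
    rw [Finset.range_add_one, Finset.filter_insert, if_neg]
    rintro ⟨hpp, -⟩
    exact hnp hpp
  simp only [hex, hfl]

theorem pvHF_step_prime (n i t : Nat) (hp : i.Prime) (hin : i < n) (ht : t < n) :
    (if 2 * i ≤ t ∧ t < n ∧ i ∣ t then
       (if Function.update (pvHF i) i ((i : Nat) : Int) t = 0 then ((i : Nat) : Int)
        else Function.update (pvHF i) i ((i : Nat) : Int) t)
     else Function.update (pvHF i) i ((i : Nat) : Int) t) = pvHF (i + 1) t := by
  have h2 := hp.two_le
  have hmfi : i.minFac = i := (pv_prime_iff_minFac i h2).mp hp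
  by_cases hti : t = i
  · subst hti
    rw [if_neg (by omega : ¬ (2 * t ≤ t ∧ t < n ∧ t ∣ t))]
    rw [Function.update_self]
    unfold pvHF
    rw [if_pos ⟨h2, by omega⟩, hmfi]
  · rw [Function.update_of_ne hti]
    by_cases hc : 2 * i ≤ t ∧ t < n ∧ i ∣ t
    · obtain ⟨hc1, -, hc3⟩ := hc
      rw [if_pos ⟨hc1, ht, hc3⟩]
      have h2t : 2 ≤ t := by omega
      have hmfle : t.minFac ≤ i := Nat.minFac_le_of_dvd h2 hc3
      by_cases h0 : pvHF i t = 0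
      · rw [if_pos h0]
        have hge : ¬ (2 ≤ t ∧ t.minFac < i) := (pvHF_eq_zero_iff i t).mp h0
        have heq : t.minFac = i := by omega
        unfold pvHF
        rw [if_pos ⟨h2t, by omega⟩, heq]
      · rw [if_neg h0]
        have hlt : t.minFac < i := by
          rcases Nat.lt_or_ge t.minFac i with h | h
          · exact h
          · exact absurd ((pvHF_eq_zero_iff i t).mpr (by omega)) h0
        unfold pvHF
        rw [if_pos ⟨h2t, hlt⟩, if_pos ⟨h2t, by omega⟩]
    · rw [if_neg hc]
      unfold pvHF
      by_cases h2t : 2 ≤ t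
      · have hne : t.minFac ≠ i := by
          intro he
          have hdvd : i ∣ t := he ▸ Nat.minFac_dvd t
          obtain ⟨c, hc'⟩ := hdvd
          rcases Nat.lt_or_ge c 2 with hc2 | hc2
          · interval_cases c <;> omega
          · exact hc ⟨by nlinarith, ht, he ▸ Nat.minFac_dvd t⟩
        by_cases hlt : t.minFac < i
        · simp [h2t, hlt, (by omega : t.minFac < i + 1)]
        · have hnle : ¬ t.minFac ≤ i := by omega
          simp [h2t, hlt, Nat.lt_succ_iff, hnle]
      · simp [h2t]

theorem pvGF_step_prime (n i t : Nat) (hp : i.Prime) (hin : i < n) (ht : t < n) :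
    (if i * i ≤ t ∧ t < n ∧ i * i ∣ t then 0
     else if 1 * i ≤ t ∧ t < n ∧ i ∣ t then pvGF i t * -1 else pvGF i t) = pvGF (i + 1) t := by
  have h2 := hp.two_le
  have hii4 : 4 ≤ i * i := by nlinarith
  by_cases h2t : 2 ≤ t
  · have ht0 : 0 < t := by omega
    by_cases hdvd : i ∣ t
    · have hit : i ≤ t := Nat.le_of_dvd ht0 hdvd
      have hcnt : (Finset.range (i + 1)).filter (fun p => p.Prime ∧ p ∣ t)
          = insert i ((Finset.range i).filter (fun p => p.Prime ∧ p ∣ t)) := by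
        rw [Finset.range_add_one, Finset.filter_insert, if_pos ⟨hp, hdvd⟩]
      have hinotin : i ∉ (Finset.range i).filter (fun p => p.Prime ∧ p ∣ t) := by
        simp [Finset.mem_filter]
      by_cases hii : i * i ∣ t
      · have hiit : i * i ≤ t := Nat.le_of_dvd ht0 hii
        rw [if_pos ⟨hiit, ht, hii⟩]
        unfold pvGF
        rw [if_neg (by omega : ¬ t < 2), if_pos ⟨i, Finset.mem_range.mpr (by omega), hp, hii⟩]
      · rw [if_neg (by rintro ⟨-, -, h⟩; exact hii h), if_pos ⟨by omega, ht, hdvd⟩]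
        have hex : (∃ p ∈ Finset.range (i + 1), p.Prime ∧ p * p ∣ t)
            ↔ (∃ p ∈ Finset.range i, p.Prime ∧ p * p ∣ t) := by
          constructor
          · rintro ⟨p, hpm, hpp, hd⟩
            have := Finset.mem_range.mp hpm
            have hpi : p ≠ i := by rintro rfl; exact hii hd
            exact ⟨p, Finset.mem_range.mpr (by omega), hpp, hd⟩
          · rintro ⟨p, hpm, hpp, hd⟩
            have := Finset.mem_range.mp hpm
            exact ⟨p, Finset.mem_range.mpr (by omega), hpp, hd⟩
        unfold pvGF
        rw [if_neg (by omega : ¬ t < 2), if_neg (by omega : ¬ t < 2)]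
        simp only [hex]
        by_cases hsq : ∃ p ∈ Finset.range i, p.Prime ∧ p * p ∣ t
        · rw [if_pos hsq, if_pos hsq]; ring
        · rw [if_neg hsq, if_neg hsq, hcnt, Finset.card_insert_of_notMem hinotin]
          ring
    · rw [if_neg (by rintro ⟨-, -, h⟩; exact hdvd (Dvd.dvd.trans ⟨i, rfl⟩ h)),
        if_neg (by rintro ⟨-, -, h⟩; exact hdvd h)]
      have hex : (∃ p ∈ Finset.range (i + 1), p.Prime ∧ p * p ∣ t)
          ↔ (∃ p ∈ Finset.range i, p.Prime ∧ p * p ∣ t) := by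
        constructor
        · rintro ⟨p, hpm, hpp, hd⟩
          have := Finset.mem_range.mp hpm
          have hpi : p ≠ i := by
            rintro rfl
            exact hdvd (Dvd.dvd.trans ⟨p, rfl⟩ hd)
          exact ⟨p, Finset.mem_range.mpr (by omega), hpp, hd⟩
        · rintro ⟨p, hpm, hpp, hd⟩
          have := Finset.mem_range.mp hpm
          exact ⟨p, Finset.mem_range.mpr (by omega), hpp, hd⟩
      have hfl : (Finset.range (i + 1)).filter (fun p => p.Prime ∧ p ∣ t)
          = (Finset.range i).filter (fun p => p.Prime ∧ p ∣ t) := by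
        rw [Finset.range_add_one, Finset.filter_insert, if_neg]
        rintro ⟨-, hd⟩
        exact hdvd hd
      unfold pvGF
      simp only [hex, hfl]
  · rw [if_neg (by omega), if_neg (by omega)]
    unfold pvGF
    rw [if_pos (by omega : t < 2), if_pos (by omega : t < 2)]


theorem pvA_step (n i : Nat) (h2 : 2 ≤ i) (hin : i < n) :
    pvBodyA ((n : Nat) : Int) ((List.range n).map (pvGF i), (List.range n).map (pvHF i)) (i : Int)
      = ((List.range n).map (pvGF (i + 1)), (List.range n).map (pvHF (i + 1))) := by
  have hhread : PySem.List.pyGetD ((List.range n).map (pvHF i)) ((i : Nat) : Int) 0 = pvHF i i :=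
    pv_pyGetD_map_range n i (pvHF i) 0 hin
  have hstep : (0 : Int) < ((i : Nat) : Int) := by omega
  have hstep2 : (0 : Int) < ((i : Nat) : Int) * ((i : Nat) : Int) := by positivity
  unfold pvBodyA
  simp only [hhread]
  by_cases hpr : i.Prime
  · -- i is prime: both inner branches run
    have hmfi : i.minFac = i := (pv_prime_iff_minFac i h2).mp hpr
    have hH0 : pvHF i i = 0 := (pvHF_eq_zero_iff i i).mpr (by omega)
    rw [if_pos hH0, pv_pySetD_map_range n i (pvHF i) ((i : Nat) : Int) hin]
    rw [PySem.List.foldl_congr_mem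
        (PySem.List.pyRange (2 * ((i : Nat) : Int)) ((n : Nat) : Int) ((i : Nat) : Int))
        _ (fun xs j => PySem.List.pySetD xs j
            ((fun x => if x = 0 then ((i : Nat) : Int) else x) (PySem.List.pyGetD xs j 0))) _
        (fun acc x hx => pv_condset_eq acc x _ (by
          have := (PySem.List.mem_pyRange_iff_of_pos hstep x).mp hx
          omega))]
    rw [pv_foldl_setU (fun x => if x = 0 then ((i : Nat) : Int) else x) _ n
        (Function.update (pvHF i) i ((i : Nat) : Int))
        (pv_nodup_pyRange_pos _ _ _ hstep)
        (fun j hj => by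
          have := (PySem.List.mem_pyRange_iff_of_pos hstep j).mp hj
          omega)]
    have hspf : ((List.range n).map fun (t : Nat) =>
        if ((t : Nat) : Int) ∈ PySem.List.pyRange (2 * ((i : Nat) : Int)) ((n : Nat) : Int) ((i : Nat) : Int) then
          (fun x => if x = 0 then ((i : Nat) : Int) else x) (Function.update (pvHF i) i ((i : Nat) : Int) t)
        else Function.update (pvHF i) i ((i : Nat) : Int) t)
        = (List.range n).map (pvHF (i + 1)) := by
      apply pv_map_range_congr
      intro t ht
      have hmem : (((t : Nat) : Int) ∈ PySem.List.pyRange (2 * ((i : Nat) : Int)) ((n : Nat) : Int) ((i : Nat) : Int))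
          ↔ (2 * i ≤ t ∧ t < n ∧ i ∣ t) :=
        pv_mem_prog' _ _ i 2 t n (by omega) (by push_cast; ring) rfl
      by_cases hm : 2 * i ≤ t ∧ t < n ∧ i ∣ t
      · rw [if_pos (hmem.mpr hm)]
        have hx := pvHF_step_prime n i t hpr hin ht
        rw [if_pos hm] at hx
        exact hx
      · rw [if_neg (fun hx => hm (hmem.mp hx))]
        have hx := pvHF_step_prime n i t hpr hin ht
        rw [if_neg hm] at hx
        exact hx
    rw [hspf]
    have hread2 : PySem.List.pyGetD ((List.range n).map (pvHF (i + 1))) ((i : Nat) : Int) 0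
        = ((i : Nat) : Int) := by
      rw [pv_pyGetD_map_range n i _ 0 hin]
      unfold pvHF
      rw [if_pos ⟨h2, by omega⟩, hmfi]
    rw [hread2, if_pos rfl]
    rw [pv_foldl_setU (fun x => x * -1) _ n (pvGF i)
        (pv_nodup_pyRange_pos _ _ _ hstep)
        (fun j hj => by
          have := (PySem.List.mem_pyRange_iff_of_pos hstep j).mp hj
          omega)]
    rw [pv_foldl_setU (fun _ => (0 : Int)) _ n
        (fun (t : Nat) =>
          if ((t : Nat) : Int) ∈ PySem.List.pyRange ((i : Nat) : Int) ((n : Nat) : Int) ((i : Nat) : Int) then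
            pvGF i t * -1 else pvGF i t)
        (pv_nodup_pyRange_pos _ _ _ hstep2)
        (fun j hj => by
          have := (PySem.List.mem_pyRange_iff_of_pos hstep2 j).mp hj
          omega)]
    have hmu : ((List.range n).map fun (t : Nat) =>
        if ((t : Nat) : Int) ∈ PySem.List.pyRange (((i : Nat) : Int) * ((i : Nat) : Int)) ((n : Nat) : Int)
            (((i : Nat) : Int) * ((i : Nat) : Int)) then (0 : Int)
        else (fun (t : Nat) =>
          if ((t : Nat) : Int) ∈ PySem.List.pyRange ((i : Nat) : Int) ((n : Nat) : Int) ((i : Nat) : Int) then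
            pvGF i t * -1 else pvGF i t) t)
        = (List.range n).map (pvGF (i + 1)) := by
      apply pv_map_range_congr
      intro t ht
      dsimp only
      have hmem2 : (((t : Nat) : Int) ∈ PySem.List.pyRange ((i : Nat) : Int) ((n : Nat) : Int) ((i : Nat) : Int))
          ↔ (1 * i ≤ t ∧ t < n ∧ i ∣ t) :=
        pv_mem_prog' _ _ i 1 t n (by omega) (by push_cast; ring) rfl
      have hmem3 : (((t : Nat) : Int) ∈ PySem.List.pyRange (((i : Nat) : Int) * ((i : Nat) : Int)) ((n : Nat) : Int)
            (((i : Nat) : Int) * ((i : Nat) : Int)))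
          ↔ (1 * (i * i) ≤ t ∧ t < n ∧ (i * i) ∣ t) :=
        pv_mem_prog' _ _ (i * i) 1 t n (by positivity) (by push_cast; ring) (by push_cast; ring)
      have hx := pvGF_step_prime n i t hpr hin ht
      by_cases hm3 : i * i ≤ t ∧ t < n ∧ i * i ∣ t
      · rw [if_pos (hmem3.mpr ⟨by simpa using hm3.1, hm3.2.1, hm3.2.2⟩)]
        rw [if_pos hm3] at hx
        exact hx
      · rw [if_neg (fun hxx => hm3 (by
          have h5 := hmem3.mp hxx
          exact ⟨by simpa using h5.1, h5.2.1, h5.2.2⟩))]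
        rw [if_neg hm3] at hx
        by_cases hm2 : 1 * i ≤ t ∧ t < n ∧ i ∣ t
        · rw [if_pos (hmem2.mpr hm2)]
          rw [if_pos hm2] at hx
          exact hx
        · rw [if_neg (fun hxx => hm2 (hmem2.mp hxx))]
          rw [if_neg hm2] at hx
          exact hx
    rw [hmu]
  · -- i is composite: nothing happens
    have hmf_le : i.minFac ≤ i := Nat.minFac_le (by omega)
    have hmf_ne : i.minFac ≠ i := fun he => hpr ((pv_prime_iff_minFac i h2).mpr he)
    have hHne : pvHF i i ≠ 0 := fun h => (pvHF_eq_zero_iff i i).mp h ⟨h2, by omega⟩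
    rw [if_neg hHne, hhread]
    have hHval : pvHF i i = ((i.minFac : Nat) : Int) := by
      unfold pvHF
      rw [if_pos ⟨h2, by omega⟩]
    have hne2 : pvHF i i ≠ ((i : Nat) : Int) := by
      rw [hHval]
      intro he
      have : i.minFac = i := by exact_mod_cast he
      omega
    rw [if_neg hne2]
    exact congrArg₂ Prod.mk
      (pv_map_range_congr n _ _ (fun t _ => (pvGF_step_comp i t hpr).symm))
      (pv_map_range_congr n _ _ (fun t _ => (pvHF_step_comp i t h2 hpr).symm))

theorem pvA_loop (n d : Nat) (hd : 2 + d ≤ n) :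
    (PySem.List.pyRange 2 (2 + (d : Int)) 1).foldl (pvBodyA ((n : Nat) : Int))
        ((List.range n).map (pvGF 2), (List.range n).map (pvHF 2))
      = ((List.range n).map (pvGF (2 + d)), (List.range n).map (pvHF (2 + d))) := by
  induction d with
  | zero => simp [PySem.List.pyRange_one_eq_nil (by omega : (2:Int) ≤ 2)]
  | succ d ih =>
    have h1 : (2 : Int) ≤ 2 + (d : Int) := by omega
    have h2 : (2 + ((d + 1 : Nat) : Int)) = (2 + (d : Int)) + 1 := by push_cast; ring
    rw [h2, PySem.List.pyRange_one_succ_right h1, List.foldl_append, ih (by omega)]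
    simp only [List.foldl_cons, List.foldl_nil]
    have : (2 + (d : Int)) = ((2 + d : Nat) : Int) := by push_cast; ring
    rw [this, pvA_step n (2 + d) (by omega) (by omega)]
    rfl

theorem pvGF_init (t : Nat) : pvGF 2 t = 1 := by
  by_cases ht : t < 2
  · simp [pvGF, ht]
  · have hex : ¬ ∃ p ∈ Finset.range 2, p.Prime ∧ p * p ∣ t := by
      rintro ⟨p, hp, hpp, -⟩
      have := hpp.two_le
      simp only [Finset.mem_range] at hp
      omega
    have hfl : ((Finset.range 2).filter (fun p => p.Prime ∧ p ∣ t)) = ∅ := by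
      apply Finset.filter_eq_empty_iff.mpr
      rintro p hp ⟨hpp, -⟩
      have := hpp.two_le
      simp only [Finset.mem_range] at hp
      omega
    simp [pvGF, ht, hfl]
    intro x hx hpx hd
    exact absurd hpx.two_le (by omega)

theorem pvHF_init (t : Nat) : pvHF 2 t = 0 := by
  by_cases ht : 2 ≤ t
  · have := (Nat.minFac_prime (by omega : t ≠ 1)).two_le
    simp [pvHF, ht]; omega
  · simp [pvHF, ht]

theorem pvGF_final (n t : Nat) (ht : t < n) : pvGF n t = pvMuF t := by
  by_cases h2 : t < 2
  · simp [pvGF, pvMuF, h2]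
  · have ht0 : 0 < t := by omega
    have hex : (∃ p ∈ Finset.range n, p.Prime ∧ p * p ∣ t) ↔ ¬ Squarefree t := by
      constructor
      · rintro ⟨p, -, hpp, hdd⟩ hsq
        exact (Nat.squarefree_iff_prime_squarefree.mp hsq) p hpp hdd
      · intro hsq
        rw [Nat.squarefree_iff_prime_squarefree] at hsq
        push_neg at hsq
        obtain ⟨p, hpp, hdd⟩ := hsq
        refine ⟨p, Finset.mem_range.mpr ?_, hpp, hdd⟩
        have hle : p * p ≤ t := Nat.le_of_dvd ht0 hdd
        nlinarith [hpp.two_le]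
    have hfl : ((Finset.range n).filter (fun p => p.Prime ∧ p ∣ t)) = t.primeFactors := by
      ext q
      simp only [Finset.mem_filter, Finset.mem_range, Nat.mem_primeFactors]
      constructor
      · rintro ⟨-, hq, hd⟩; exact ⟨hq, hd, by omega⟩
      · rintro ⟨hq, hd, -⟩
        exact ⟨by have := Nat.le_of_dvd ht0 hd; omega, hq, hd⟩
    by_cases hsq : Squarefree t
    · simp [pvGF, pvMuF, h2, hsq, hfl]
      intro x _ hx hd
      exact absurd hd ((Nat.squarefree_iff_prime_squarefree.mp hsq) x hx)
    · simp [pvGF, pvMuF, h2, hsq]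
      obtain ⟨p, hp, hpp, hdd⟩ := hex.mpr hsq
      exact ⟨p, Finset.mem_range.mp hp, hpp, hdd⟩

theorem pvHF_final (n t : Nat) (ht : t < n) : pvHF n t = pvSpfF t := by
  by_cases h2 : 2 ≤ t
  · have : t.minFac ≤ t := Nat.minFac_le (by omega)
    simp [pvHF, pvSpfF, h2, (by omega : ¬ t < 2)]
    omega
  · simp [pvHF, pvSpfF, h2, (by omega : t < 2)]

theorem pvA_final (max_n : Int) (h : 2 ≤ max_n) :
    compute_mobius max_n
      = ((List.range (max_n + 1).toNat).map pvMuF, (List.range (max_n + 1).toNat).map pvSpfF) := by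
  rw [pvA_as_body]
  set n := (max_n + 1).toNat with hn
  have hni : ((n : Nat) : Int) = max_n + 1 := Int.toNat_of_nonneg (by omega)
  have hn3 : 3 ≤ n := by omega
  rw [← hni]
  have h1 : List.replicate n (1 : Int) = (List.range n).map (pvGF 2) := by
    rw [pv_map_range_congr n (pvGF 2) (fun _ => (1 : Int)) (fun t _ => pvGF_init t), List.map_const']
    simp
  have h0 : List.replicate n (0 : Int) = (List.range n).map (pvHF 2) := by
    rw [pv_map_range_congr n (pvHF 2) (fun _ => (0 : Int)) (fun t _ => pvHF_init t), List.map_const']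
    simp
  rw [h1, h0]
  have hloop := pvA_loop n (n - 2) (by omega)
  rw [show (2 : Int) + ((n - 2 : Nat) : Int) = ((n : Nat) : Int) by omega,
    show 2 + (n - 2) = n from by omega] at hloop
  rw [hloop]
  exact congrArg₂ Prod.mk
    (pv_map_range_congr n _ _ (fun t ht => pvGF_final n t ht))
    (pv_map_range_congr n _ _ (fun t ht => pvHF_final n t ht))

-- ---- B-side proof ----

theorem pv_markLoop (mx i : Nat) (h2 : 2 ≤ i) (hmx : i ≤ mx) (ps : List Nat)
    (hsort : ps.Pairwise (· < ·)) (hpr : ∀ p ∈ ps, p.Prime) (hmf : i.minFac ∈ ps)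
    (g h : Nat → Int) (hgi : g i = pvMuF i) :
    pvMarkLoop (mx : Int) (i : Int) (ps.map (Nat.cast))
        ((List.range (mx + 1)).map g, (List.range (mx + 1)).map h)
      = ((List.range (mx + 1)).map fun t =>
            if i ∣ t ∧ t / i ∈ ps ∧ t ≤ mx ∧ t / i ≤ i.minFac then
              (if (t / i) ∣ i then 0 else -(pvMuF i)) else g t,
          (List.range (mx + 1)).map fun t =>
            if i ∣ t ∧ t / i ∈ ps ∧ t ≤ mx ∧ t / i ≤ i.minFac then ((t / i : Nat) : Int) else h t) := by
  revert hsort hpr hmf hgi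
  induction ps generalizing g h with
  | nil =>
    intro _ _ hmf _
    exact absurd hmf (List.not_mem_nil)
  | cons p ps ih =>
    intro hsort hpr hmf hgi
    have hp : p.Prime := hpr p (List.mem_cons_self)
    have hp2 := hp.two_le
    have hip : ((i : Nat) : Int) * ((p : Nat) : Int) = (((i * p) : Nat) : Int) := by push_cast; ring
    have htail : ∀ q ∈ ps, p < q := (List.pairwise_cons.mp hsort).1
    simp only [List.map_cons, pvMarkLoop]
    by_cases hbig : mx < i * p
    · rw [if_pos (by rw [hip]; exact_mod_cast hbig)]
      have hnotC : ∀ t, ¬ (i ∣ t ∧ t / i ∈ p :: ps ∧ t ≤ mx ∧ t / i ≤ i.minFac) := by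
        rintro t ⟨hdv, hq, hle, -⟩
        have hqp : p ≤ t / i := by
          rcases List.mem_cons.mp hq with hh | hh
          · omega
          · exact le_of_lt (htail _ hh)
        have h5 : i * p ≤ i * (t / i) := Nat.mul_le_mul_left i hqp
        have h6 : i * (t / i) = t := Nat.mul_div_cancel' hdv
        omega
      refine congrArg₂ Prod.mk ?_ ?_ <;>
        exact (pv_map_range_congr _ _ _ (fun t _ => by rw [if_neg (hnotC t)])).symm
    · have hle : i * p ≤ mx := by omega
      rw [if_neg (by rw [hip]; intro hcon; exact hbig (by exact_mod_cast hcon))]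
      by_cases hdvd : p ∣ i
      · rw [if_pos (by rw [PySem.Int.mod_eq_zero_iff_dvd]; exact_mod_cast hdvd)]
        have hple : i.minFac ≤ p := Nat.minFac_le_of_dvd hp.two_le hdvd
        have hpm : p = i.minFac := by
          rcases List.mem_cons.mp hmf with hh | hh
          · omega
          · have := htail _ hh; omega
        rw [hip, pv_pySetD_map_range (mx + 1) (i * p) h ((p : Nat) : Int) (by omega),
          pv_pySetD_map_range (mx + 1) (i * p) g 0 (by omega)]
        have hdivq : (i * p) / i = p := Nat.mul_div_cancel_left p (by omega)
        have hCip : i ∣ i * p ∧ (i * p) / i ∈ p :: ps ∧ i * p ≤ mx ∧ (i * p) / i ≤ i.minFac := by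
          refine ⟨⟨p, rfl⟩, ?_, hle, ?_⟩
          · rw [hdivq]; exact List.mem_cons_self
          · rw [hdivq]; omega
        have hnotC : ∀ t, t ≠ i * p → ¬ (i ∣ t ∧ t / i ∈ p :: ps ∧ t ≤ mx ∧ t / i ≤ i.minFac) := by
          rintro t hne ⟨hdv, hq, -, hq2⟩
          rcases List.mem_cons.mp hq with hh | hh
          · exact hne (by rw [← Nat.mul_div_cancel' hdv, hh])
          · have := htail _ hh; omega
        refine congrArg₂ Prod.mk ?_ ?_ <;> apply pv_map_range_congr <;> intro t ht
        · by_cases hti : t = i * p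
          · subst hti
            rw [Function.update_self, if_pos hCip, hdivq, if_pos hdvd]
          · rw [Function.update_of_ne hti, if_neg (hnotC t hti)]
        · by_cases hti : t = i * p
          · subst hti
            rw [Function.update_self, if_pos hCip, hdivq]
          · rw [Function.update_of_ne hti, if_neg (hnotC t hti)]
      · rw [if_neg (by rw [PySem.Int.mod_eq_zero_iff_dvd]; intro hcon; exact hdvd (by exact_mod_cast hcon))]
        rw [pv_pyGetD_map_range (mx + 1) i g 0 (by omega), hgi, hip,
          pv_pySetD_map_range (mx + 1) (i * p) h ((p : Nat) : Int) (by omega),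
          pv_pySetD_map_range (mx + 1) (i * p) g (-(pvMuF i)) (by omega)]
        have hmftail : i.minFac ∈ ps := by
          rcases List.mem_cons.mp hmf with hh | hh
          · exact absurd (hh ▸ Nat.minFac_dvd i) hdvd
          · exact hh
        have hplt : p < i.minFac := by
          have := htail _ hmftail; omega
        rw [ih (Function.update g (i * p) (-(pvMuF i))) (Function.update h (i * p) ((p : Nat) : Int))
          (List.Pairwise.of_cons hsort) (fun q hq => hpr q (List.mem_cons_of_mem _ hq)) hmftail
          (by rw [Function.update_of_ne (by nlinarith : i ≠ i * p)]; exact hgi)]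
        have hCip : i ∣ i * p ∧ (i * p) / i ∈ p :: ps ∧ i * p ≤ mx ∧ (i * p) / i ≤ i.minFac := by
          have hdivq : (i * p) / i = p := Nat.mul_div_cancel_left p (by omega)
          refine ⟨⟨p, rfl⟩, ?_, hle, ?_⟩
          · rw [hdivq]; exact List.mem_cons_self
          · rw [hdivq]; omega
        have hkey : ∀ t, (i ∣ t ∧ t / i ∈ ps ∧ t ≤ mx ∧ t / i ≤ i.minFac) →
            (i ∣ t ∧ t / i ∈ p :: ps ∧ t ≤ mx ∧ t / i ≤ i.minFac) := by
          rintro t ⟨h1, h2', h3, h4⟩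
          exact ⟨h1, List.mem_cons_of_mem _ h2', h3, h4⟩
        have hsplit : ∀ t, ¬ (i ∣ t ∧ t / i ∈ ps ∧ t ≤ mx ∧ t / i ≤ i.minFac) → t ≠ i * p →
            ¬ (i ∣ t ∧ t / i ∈ p :: ps ∧ t ≤ mx ∧ t / i ≤ i.minFac) := by
          rintro t hnC hne ⟨h1, h2', h3, h4⟩
          rcases List.mem_cons.mp h2' with hh | hh
          · exact hne (by rw [← Nat.mul_div_cancel' h1, hh])
          · exact hnC ⟨h1, hh, h3, h4⟩
        refine congrArg₂ Prod.mk ?_ ?_ <;> apply pv_map_range_congr <;> intro t ht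
        · by_cases hC : i ∣ t ∧ t / i ∈ ps ∧ t ≤ mx ∧ t / i ≤ i.minFac
          · rw [if_pos hC, if_pos (hkey t hC)]
          · rw [if_neg hC]
            by_cases hti : t = i * p
            · subst hti
              rw [Function.update_self, if_pos hCip,
                Nat.mul_div_cancel_left p (by omega : 0 < i), if_neg hdvd]
            · rw [Function.update_of_ne hti, if_neg (hsplit t hC hti)]
        · by_cases hC : i ∣ t ∧ t / i ∈ ps ∧ t ≤ mx ∧ t / i ≤ i.minFac
          · rw [if_pos hC, if_pos (hkey t hC)]
          · rw [if_neg hC]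
            by_cases hti : t = i * p
            · subst hti
              rw [Function.update_self, if_pos hCip,
                Nat.mul_div_cancel_left p (by omega : 0 < i)]
            · rw [Function.update_of_ne hti, if_neg (hsplit t hC hti)]

theorem pvAsg_lt (t : Nat) (h2 : 2 ≤ t) : pvAsg t ≤ t := by
  unfold pvAsg
  split_ifs
  · omega
  · exact Nat.le_of_lt (Nat.div_lt_self (by omega) (Nat.minFac_prime (by omega : t ≠ 1)).one_lt)

theorem pv_comp_div_two (t : Nat) (h2 : 2 ≤ t) (hnp : ¬ t.Prime) :
    2 ≤ t / t.minFac ∧ t / t.minFac < t ∧ t.minFac * (t / t.minFac) = t := by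
  have hq := Nat.minFac_prime (by omega : t ≠ 1)
  have hdvd := Nat.minFac_dvd t
  have hmul : t.minFac * (t / t.minFac) = t := Nat.mul_div_cancel' hdvd
  have hlt : t / t.minFac < t := Nat.div_lt_self (by omega) hq.one_lt
  have hne0 : t / t.minFac ≠ 0 := by intro h0; rw [h0, mul_zero] at hmul; omega
  have hne1 : t / t.minFac ≠ 1 := by
    intro h1; rw [h1, mul_one] at hmul; exact hnp (hmul ▸ hq)
  exact ⟨(Nat.two_le_iff _).mpr ⟨hne0, hne1⟩, hlt, hmul⟩

theorem pvB_cond_iff (mx i t : Nat) (h2 : 2 ≤ i) (hmx : i ≤ mx) (ht : t < mx + 1) :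
    (i ∣ t ∧ t / i ∈ pvPrimes (i + 1) ∧ t ≤ mx ∧ t / i ≤ i.minFac)
      ↔ (2 ≤ t ∧ ¬ t.Prime ∧ t / t.minFac = i) := by
  constructor
  · rintro ⟨hdv, hq, -, hqle⟩
    obtain ⟨hqlt, hqp⟩ := (pv_mem_pvPrimes _ _).mp hq
    have hq2 := hqp.two_le
    have hqeq : t = i * (t / i) := (Nat.mul_div_cancel' hdv).symm
    have hmf : t.minFac = t / i := by
      conv_lhs => rw [hqeq]
      exact pv_minFac_mul i (t / i) h2 hqp hqle
    have h2t : 2 ≤ t := by nlinarith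
    refine ⟨h2t, ?_, ?_⟩
    · intro hprime
      rcases hprime.eq_one_or_self_of_dvd i hdv with hh | hh
      · omega
      · nlinarith
    · rw [hmf]
      calc t / (t / i) = i * (t / i) / (t / i) := by rw [← hqeq]
        _ = i := Nat.mul_div_cancel i (lt_of_lt_of_le (by norm_num) hq2)
  · rintro ⟨h2t, hnp, hdiv⟩
    obtain ⟨hge, hlt, hmul⟩ := pv_comp_div_two t h2t hnp
    have hq := Nat.minFac_prime (by omega : t ≠ 1)
    have heq : t = i * t.minFac := by
      rw [← hdiv, mul_comm]
      exact hmul.symm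
    have hdv : i ∣ t := ⟨t.minFac, heq⟩
    have hti : t / i = t.minFac := by
      conv_lhs => rw [heq]
      exact Nat.mul_div_cancel_left t.minFac (by omega : 0 < i)
    have hmfle : t.minFac ≤ i.minFac :=
      Nat.minFac_le_of_dvd (Nat.minFac_prime (by omega : i ≠ 1)).two_le
        (dvd_trans (Nat.minFac_dvd i) hdv)
    have hmile : i.minFac ≤ i := Nat.minFac_le (by omega)
    refine ⟨hdv, (pv_mem_pvPrimes _ _).mpr ⟨by rw [hti]; omega, hti ▸ hq⟩, by omega,
      by rw [hti]; exact hmfle⟩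

theorem pvGB_step_pt (mx i t : Nat) (h2 : 2 ≤ i) (hmx : i ≤ mx) (ht : t < mx + 1) :
    (if i ∣ t ∧ t / i ∈ pvPrimes (i + 1) ∧ t ≤ mx ∧ t / i ≤ i.minFac then
       (if (t / i) ∣ i then 0 else -(pvMuF i))
     else (if t = i then pvMuF i else pvGB i t)) = pvGB (i + 1) t := by
  by_cases hC : i ∣ t ∧ t / i ∈ pvPrimes (i + 1) ∧ t ≤ mx ∧ t / i ≤ i.minFac
  · rw [if_pos hC]
    obtain ⟨h2t, hnp, hdiv⟩ := (pvB_cond_iff mx i t h2 hmx ht).mp hC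
    obtain ⟨hdv, hq, -, hqle⟩ := hC
    obtain ⟨hqlt, hqp⟩ := (pv_mem_pvPrimes _ _).mp hq
    have hasg : pvAsg t = i := by unfold pvAsg; rw [if_neg hnp]; exact hdiv
    have hGB : pvGB (i + 1) t = pvMuF t := by
      unfold pvGB; rw [if_pos ⟨h2t, by omega⟩]
    rw [hGB]
    have hqeq : t = i * (t / i) := (Nat.mul_div_cancel' hdv).symm
    by_cases hpd : (t / i) ∣ i
    · rw [if_pos hpd]
      conv_rhs => rw [hqeq]
      rw [pv_muF_mul_dvd i (t / i) h2 hqp hpd]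
    · rw [if_neg hpd]
      have hqlt2 : t / i < i.minFac := by
        rcases Nat.lt_or_ge (t / i) i.minFac with hh | hh
        · exact hh
        · have hx : t / i = i.minFac := by omega
          exact absurd (hx ▸ Nat.minFac_dvd i) hpd
      conv_rhs => rw [hqeq]
      rw [pv_muF_mul i (t / i) h2 hqp hqlt2]
  · rw [if_neg hC]
    by_cases hti : t = i
    · subst hti
      have ha := pvAsg_lt t h2
      rw [if_pos rfl]
      unfold pvGB
      rw [if_pos ⟨h2, by omega⟩]
    · rw [if_neg hti]
      unfold pvGB
      by_cases h2t : 2 ≤ t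
      · have hne : pvAsg t ≠ i := by
          intro he
          unfold pvAsg at he
          by_cases hpt : t.Prime
          · rw [if_pos hpt] at he; exact hti he
          · rw [if_neg hpt] at he
            exact hC ((pvB_cond_iff mx i t h2 hmx ht).mpr ⟨h2t, hpt, he⟩)
        by_cases hlt : pvAsg t < i
        · rw [if_pos ⟨h2t, hlt⟩, if_pos ⟨h2t, by omega⟩]
        · rw [if_neg (by rintro ⟨-, hh⟩; omega), if_neg (by rintro ⟨-, hh⟩; omega)]
      · rw [if_neg (fun hh => h2t hh.1), if_neg (fun hh => h2t hh.1)]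

theorem pvHB_step_pt (mx i t : Nat) (h2 : 2 ≤ i) (hmx : i ≤ mx) (ht : t < mx + 1) :
    (if i ∣ t ∧ t / i ∈ pvPrimes (i + 1) ∧ t ≤ mx ∧ t / i ≤ i.minFac then ((t / i : Nat) : Int)
     else (if t = i then ((i.minFac : Nat) : Int) else pvHB i t)) = pvHB (i + 1) t := by
  by_cases hC : i ∣ t ∧ t / i ∈ pvPrimes (i + 1) ∧ t ≤ mx ∧ t / i ≤ i.minFac
  · rw [if_pos hC]
    obtain ⟨h2t, hnp, hdiv⟩ := (pvB_cond_iff mx i t h2 hmx ht).mp hC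
    obtain ⟨hdv, hq, -, hqle⟩ := hC
    obtain ⟨hqlt, hqp⟩ := (pv_mem_pvPrimes _ _).mp hq
    have hasg : pvAsg t = i := by unfold pvAsg; rw [if_neg hnp]; exact hdiv
    have hqeq : t = i * (t / i) := (Nat.mul_div_cancel' hdv).symm
    have hmf : t.minFac = t / i := by
      conv_lhs => rw [hqeq]
      exact pv_minFac_mul i (t / i) h2 hqp hqle
    unfold pvHB
    rw [if_pos ⟨h2t, by omega⟩, hmf]
  · rw [if_neg hC]
    by_cases hti : t = i
    · subst hti
      have ha := pvAsg_lt t h2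
      rw [if_pos rfl]
      unfold pvHB
      rw [if_pos ⟨h2, by omega⟩]
    · rw [if_neg hti]
      unfold pvHB
      by_cases h2t : 2 ≤ t
      · have hne : pvAsg t ≠ i := by
          intro he
          unfold pvAsg at he
          by_cases hpt : t.Prime
          · rw [if_pos hpt] at he; exact hti he
          · rw [if_neg hpt] at he
            exact hC ((pvB_cond_iff mx i t h2 hmx ht).mpr ⟨h2t, hpt, he⟩)
        by_cases hlt : pvAsg t < i
        · rw [if_pos ⟨h2t, hlt⟩, if_pos ⟨h2t, by omega⟩]
        · rw [if_neg (by rintro ⟨-, hh⟩; omega), if_neg (by rintro ⟨-, hh⟩; omega)]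
      · rw [if_neg (fun hh => h2t hh.1), if_neg (fun hh => h2t hh.1)]

theorem pvB_step_common (mx i : Nat) (h2 : 2 ≤ i) (hmx : i ≤ mx) :
    pvMarkLoop ((mx : Nat) : Int) ((i : Nat) : Int) ((pvPrimes (i + 1)).map (Nat.cast))
        ((List.range (mx + 1)).map (fun t => if t = i then pvMuF i else pvGB i t),
         (List.range (mx + 1)).map (fun t => if t = i then ((i.minFac : Nat) : Int) else pvHB i t))
      = ((List.range (mx + 1)).map (pvGB (i + 1)), (List.range (mx + 1)).map (pvHB (i + 1))) := by
  rw [pv_markLoop mx i h2 hmx (pvPrimes (i + 1)) (pv_pvPrimes_sorted _)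
      (fun p hp => ((pv_mem_pvPrimes _ _).mp hp).2)
      ((pv_mem_pvPrimes _ _).mpr
        ⟨by have := Nat.minFac_le (by omega : 0 < i); omega, Nat.minFac_prime (by omega : i ≠ 1)⟩)
      _ _ (by rw [if_pos rfl])]
  refine congrArg₂ Prod.mk ?_ ?_ <;> apply pv_map_range_congr <;> intro t ht <;> dsimp only
  · exact pvGB_step_pt mx i t h2 hmx ht
  · exact pvHB_step_pt mx i t h2 hmx ht

theorem pvB_step (mx i : Nat) (h2 : 2 ≤ i) (hmx : i ≤ mx) :
    pvBodyB ((mx : Nat) : Int)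
        ((List.range (mx + 1)).map (pvGB i), (List.range (mx + 1)).map (pvHB i),
          (pvPrimes i).map (Nat.cast)) (i : Int)
      = ((List.range (mx + 1)).map (pvGB (i + 1)), (List.range (mx + 1)).map (pvHB (i + 1)),
          (pvPrimes (i + 1)).map (Nat.cast)) := by
  have hin : i < mx + 1 := by omega
  have hq := Nat.minFac_prime (by omega : i ≠ 1)
  have hread : PySem.List.pyGetD ((List.range (mx + 1)).map (pvHB i)) ((i : Nat) : Int) 0 = pvHB i i :=
    pv_pyGetD_map_range (mx + 1) i _ 0 hin
  unfold pvBodyB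
  simp only [hread]
  by_cases hpr : i.Prime
  · have hmfi : i.minFac = i := (pv_prime_iff_minFac i h2).mp hpr
    have hH0 : pvHB i i = 0 := by
      unfold pvHB
      rw [if_neg]
      rintro ⟨-, hlt⟩
      unfold pvAsg at hlt
      rw [if_pos hpr] at hlt
      omega
    rw [if_pos hH0]
    dsimp only
    rw [pv_pySetD_map_range (mx + 1) i (pvGB i) (-1) hin,
      pv_pySetD_map_range (mx + 1) i (pvHB i) ((i : Nat) : Int) hin]
    have hprimes : (pvPrimes i).map (Nat.cast : Nat → Int) ++ [((i : Nat) : Int)]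
        = (pvPrimes (i + 1)).map (Nat.cast : Nat → Int) := by
      rw [pv_pvPrimes_succ_prime i hpr, List.map_append]
      rfl
    rw [hprimes]
    have hg : (List.range (mx + 1)).map (Function.update (pvGB i) i (-1))
        = (List.range (mx + 1)).map (fun t => if t = i then pvMuF i else pvGB i t) := by
      apply pv_map_range_congr
      intro t ht
      by_cases hti : t = i
      · subst hti
        rw [Function.update_self, if_pos rfl, pv_muF_prime t hpr]
      · rw [Function.update_of_ne hti, if_neg hti]
    have hh : (List.range (mx + 1)).map (Function.update (pvHB i) i ((i : Nat) : Int))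
        = (List.range (mx + 1)).map (fun t => if t = i then ((i.minFac : Nat) : Int) else pvHB i t) := by
      apply pv_map_range_congr
      intro t ht
      by_cases hti : t = i
      · subst hti
        rw [Function.update_self, if_pos rfl, hmfi]
      · rw [Function.update_of_ne hti, if_neg hti]
    rw [hg, hh, pvB_step_common mx i h2 hmx]
  · have hasg : pvAsg i < i := by
      unfold pvAsg
      rw [if_neg hpr]
      exact Nat.div_lt_self (by omega) hq.one_lt
    have hHne : pvHB i i ≠ 0 := by
      unfold pvHB
      rw [if_pos ⟨h2, hasg⟩]
      have := hq.two_le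
      intro hcon
      have : i.minFac = 0 := by exact_mod_cast hcon
      omega
    rw [if_neg hHne]
    dsimp only
    have hg : (List.range (mx + 1)).map (pvGB i)
        = (List.range (mx + 1)).map (fun t => if t = i then pvMuF i else pvGB i t) := by
      apply pv_map_range_congr
      intro t ht
      by_cases hti : t = i
      · subst hti
        rw [if_pos rfl]
        unfold pvGB
        rw [if_pos ⟨h2, hasg⟩]
      · rw [if_neg hti]
    have hh : (List.range (mx + 1)).map (pvHB i)
        = (List.range (mx + 1)).map (fun t => if t = i then ((i.minFac : Nat) : Int) else pvHB i t) := by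
      apply pv_map_range_congr
      intro t ht
      by_cases hti : t = i
      · subst hti
        rw [if_pos rfl]
        unfold pvHB
        rw [if_pos ⟨h2, hasg⟩]
      · rw [if_neg hti]
    have hprimes : (pvPrimes i).map (Nat.cast : Nat → Int)
        = (pvPrimes (i + 1)).map (Nat.cast : Nat → Int) := by
      rw [pv_pvPrimes_succ_comp i hpr]
    rw [hg, hh, hprimes, pvB_step_common mx i h2 hmx]

theorem pvB_loop (mx d : Nat) (hd : 2 + d ≤ mx + 1) :
    (PySem.List.pyRange 2 (2 + (d : Int)) 1).foldl (pvBodyB ((mx : Nat) : Int))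
        ((List.range (mx + 1)).map (pvGB 2), (List.range (mx + 1)).map (pvHB 2),
          (pvPrimes 2).map (Nat.cast))
      = ((List.range (mx + 1)).map (pvGB (2 + d)), (List.range (mx + 1)).map (pvHB (2 + d)),
          (pvPrimes (2 + d)).map (Nat.cast)) := by
  induction d with
  | zero => simp [PySem.List.pyRange_one_eq_nil (by omega : (2:Int) ≤ 2)]
  | succ d ih =>
    have h1 : (2 : Int) ≤ 2 + (d : Int) := by omega
    have h2 : (2 + ((d + 1 : Nat) : Int)) = (2 + (d : Int)) + 1 := by push_cast; ring
    rw [h2, PySem.List.pyRange_one_succ_right h1, List.foldl_append, ih (by omega)]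
    simp only [List.foldl_cons, List.foldl_nil]
    have : (2 + (d : Int)) = ((2 + d : Nat) : Int) := by push_cast; ring
    rw [this, pvB_step mx (2 + d) (by omega) (by omega)]
    rfl

theorem pvAsg_ge_two (t : Nat) (h2 : 2 ≤ t) : 2 ≤ pvAsg t := by
  unfold pvAsg
  split_ifs with hp
  · omega
  · exact (pv_comp_div_two t h2 hp).1

theorem pvGB_init (t : Nat) : pvGB 2 t = 1 := by
  unfold pvGB
  rw [if_neg]
  rintro ⟨h2t, hlt⟩
  have := pvAsg_ge_two t h2t
  omega

theorem pvHB_init (t : Nat) : pvHB 2 t = 0 := by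
  unfold pvHB
  rw [if_neg]
  rintro ⟨h2t, hlt⟩
  have := pvAsg_ge_two t h2t
  omega

theorem pvPrimes_two : pvPrimes 2 = [] := by decide

theorem pvGB_final (n t : Nat) (ht : t < n) : pvGB n t = pvMuF t := by
  by_cases h2 : 2 ≤ t
  · have := pvAsg_lt t h2
    simp [pvGB, h2, (by omega : pvAsg t < n)]
  · simp [pvGB, pvMuF, h2, (by omega : t < 2)]

theorem pvHB_final (n t : Nat) (ht : t < n) : pvHB n t = pvSpfF t := by
  by_cases h2 : 2 ≤ t
  · have := pvAsg_lt t h2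
    simp [pvHB, pvSpfF, h2, (by omega : pvAsg t < n), (by omega : ¬ t < 2)]
    exact fun h => absurd h (by omega)
  · simp [pvHB, pvSpfF, h2, (by omega : t < 2)]

theorem pvB_final (max_n : Int) (h : 2 ≤ max_n) :
    compute_mobius_alt max_n
      = ((List.range (max_n + 1).toNat).map pvMuF, (List.range (max_n + 1).toNat).map pvSpfF) := by
  rw [pvB_as_body]
  set mx := max_n.toNat with hmxdef
  have hmxi : ((mx : Nat) : Int) = max_n := Int.toNat_of_nonneg (by omega)
  have hmx2 : 2 ≤ mx := by omega
  have htn : (max_n + 1).toNat = mx + 1 := by omega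
  rw [htn, ← hmxi]
  have h1 : List.replicate (mx + 1) (1 : Int) = (List.range (mx + 1)).map (pvGB 2) := by
    rw [pv_map_range_congr (mx + 1) (pvGB 2) (fun _ => (1 : Int)) (fun t _ => pvGB_init t),
      List.map_const']
    simp
  have h0 : List.replicate (mx + 1) (0 : Int) = (List.range (mx + 1)).map (pvHB 2) := by
    rw [pv_map_range_congr (mx + 1) (pvHB 2) (fun _ => (0 : Int)) (fun t _ => pvHB_init t),
      List.map_const']
    simp
  have hpzero : ([] : List Int) = (pvPrimes 2).map (Nat.cast : Nat → Int) := by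
    rw [pvPrimes_two]
    rfl
  rw [h1, h0, hpzero]
  have hloop := pvB_loop mx (mx - 1) (by omega)
  rw [show (2 : Int) + ((mx - 1 : Nat) : Int) = ((mx : Nat) : Int) + 1 by omega,
    show 2 + (mx - 1) = mx + 1 from by omega] at hloop
  rw [hloop]
  exact congrArg₂ Prod.mk
    (pv_map_range_congr (mx + 1) _ _ (fun t ht => pvGB_final (mx + 1) t ht))
    (pv_map_range_congr (mx + 1) _ _ (fun t ht => pvHB_final (mx + 1) t ht))

theorem pv_small (max_n : Int) (h : max_n ≤ 1) : compute_mobius max_n = compute_mobius_alt max_n := by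
  have hnil : PySem.List.pyRange 2 (max_n + 1) 1 = [] :=
    PySem.List.pyRange_one_eq_nil (by omega)
  simp [compute_mobius, compute_mobius_alt, hnil]


-- ===== VERDICT (by name: the statement is the Claim_ definition above) =====
theorem compute_mobius_spec : Claim_equal_compute_mobius := by
  unfold Claim_equal_compute_mobius
  intro max_n _hdom
  unfold Spec_compute_mobius
  by_cases h : max_n ≤ 1
  · exact pv_small max_n h
  · rw [pvA_final max_n (by omega), pvB_final max_n (by omega)]
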